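-- pv_equiv track=rewrite | github.com/NielsBoegman/AOC23 | Python/day3.py | findNumberHard
-- ===== SOURCE A (Python) =====
-- def findNumber(x,start,end, inp):
--     num = ""
--     for i in range(start, end+1):
--         num+=inp[x][i]
--     return int(num)
--
-- def findNumberHard(x,y,inp):
--     start = 0
--     end = len(inp[x])-1
--     for i in range(y,-1,-1):
--         if not inp[x][i].isdigit():
--             start = i+1
--             break
--     for i in range(start, len(inp[x])):
--         if not inp[x][i].isdigit():
--             end = i-1
--             break
--     return [findNumber(x, start, end, inp), end]
-- ===== SOURCE B (Python) =====
-- def digitRun(s):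
--     # length of the leading digit run of s
--     n = 0
--     for ch in s:
--         if not ch.isdigit():
--             break
--         n += 1
--     return n
--
-- def findNumberHard(x, y, inp):
--     row = inp[x]
--     left = row[:y+1] if y >= 0 else ""
--     start = len(left) - digitRun(left[::-1])
--     run = row[start:start + digitRun(row[start:])]
--     return [int(run), start + len(run) - 1]
-- ===== Notes on version B (the rewrite author's own statement) =====
-- stated objective: simpler
-- what changed: A's two index-scanning break-loops plus a char-by-char substring rebuild helper are replaced by a slice decomposition: the trailing digit run of row[:y+1] fixes start, the leading digit run of row[start:] is sliced out and int()-ed directly.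
import Mathlib
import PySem

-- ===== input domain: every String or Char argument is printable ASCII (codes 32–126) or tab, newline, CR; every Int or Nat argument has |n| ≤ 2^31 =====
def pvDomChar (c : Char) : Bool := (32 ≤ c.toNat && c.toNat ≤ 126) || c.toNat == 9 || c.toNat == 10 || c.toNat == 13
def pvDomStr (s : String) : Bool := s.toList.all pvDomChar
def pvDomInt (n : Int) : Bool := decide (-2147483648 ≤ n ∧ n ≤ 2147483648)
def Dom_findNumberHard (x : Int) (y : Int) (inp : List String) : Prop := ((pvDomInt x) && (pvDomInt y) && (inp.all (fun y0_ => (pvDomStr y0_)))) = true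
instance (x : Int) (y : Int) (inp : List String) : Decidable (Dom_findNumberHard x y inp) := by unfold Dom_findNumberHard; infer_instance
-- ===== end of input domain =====

-- B replaces A's two index-scanning break-loops and the char-by-char number rebuild by a
-- slice decomposition: trailing digit run of row[:y+1] gives start, leading digit run of
-- row[start:] gives the number slice; objective: simpler.

-- ===== PORT A =====
-- helper findNumber: num = ""; for i in range(start, end+1): num += inp[x][i]; return int(num)
def pvFindNumber (x s e : Int) (inp : List String) : Int :=
  let num := (PySem.List.pyRange s (e + 1) 1).foldl
      (fun acc i => acc ++ [PySem.List.pyGetD (PySem.List.pyGetD inp x "").toList i ' ']) ([] : List Char)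
  (PySem.Int.ofChars? num).getD 0

-- for i in range(y, -1, -1): if not inp[x][i].isdigit(): start = i+1; break   (start initialised 0);
-- ported as the lazy countdown Python's range iterator performs: fuel = number of iterations (y+1 clamped at 0)
def pvScanLeft (row : List Char) : Nat → Int → Int
  | 0, _ => 0
  | fuel + 1, i =>
    if !(PySem.Chars.isdigit (PySem.List.pyGetD row i ' ')) then i + 1
    else pvScanLeft row fuel (i - 1)

-- for i in range(start, len(inp[x])): if not inp[x][i].isdigit(): end = i-1; break   (end initialised dflt)
def pvScanRight (row : List Char) (dflt : Int) : List Int → Int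
  | [] => dflt
  | i :: rest =>
    if !(PySem.Chars.isdigit (PySem.List.pyGetD row i ' ')) then i - 1 else pvScanRight row dflt rest

def findNumberHard (x : Int) (y : Int) (inp : List String) : List Int :=
  let row := (PySem.List.pyGetD inp x "").toList
  let n : Int := row.length
  let start := pvScanLeft row (y + 1).toNat y
  let e := pvScanRight row (n - 1) (PySem.List.pyRange start n 1)
  [pvFindNumber x start e inp, e]

-- ===== PORT B =====
-- digitRun(s): n = 0; for ch in s: if not ch.isdigit(): break; n += 1; return n
def pvDigitRun : List Char → Int
  | [] => 0
  | c :: rest => if !(PySem.Chars.isdigit c) then 0 else pvDigitRun rest + 1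

def findNumberHard_alt (x : Int) (y : Int) (inp : List String) : List Int :=
  let row := (PySem.List.pyGetD inp x "").toList
  let left := if 0 ≤ y then PySem.List.slice row none (some (y + 1)) else []
  let start : Int := (left.length : Int) - pvDigitRun ((PySem.List.slice? left none none (-1)).getD [])
  let run := PySem.List.slice row (some start)
      (some (start + pvDigitRun (PySem.List.slice row (some start) none)))
  [(PySem.Int.ofChars? run).getD 0, start + (run.length : Int) - 1]

-- ===== PRECONDITION & SPEC =====
-- Pre_ = exactly the inputs where the Python A returns: x a valid (possibly negative) row index,
-- y below the row length (IndexError otherwise), and a digit at the position where the number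
-- must begin (otherwise the rebuilt substring is empty and int('') raises ValueError).
def Pre_findNumberHard (x : Int) (y : Int) (inp : List String) : Prop :=
  PySem.Raise.InRange inp.length x ∧
  y < ((PySem.List.pyGetD inp x "").toList.length : Int) ∧
  ((PySem.List.pyGet? (PySem.List.pyGetD inp x "").toList (if 0 ≤ y then y else 0)).any
      PySem.Chars.isdigit = true ∨
   (0 ≤ y ∧ (PySem.List.pyGet? (PySem.List.pyGetD inp x "").toList (y + 1)).any
      PySem.Chars.isdigit = true))
instance (x : Int) (y : Int) (inp : List String) : Decidable (Pre_findNumberHard x y inp) := by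
  unfold Pre_findNumberHard; infer_instance

def pvWitness_findNumberHard : Int × Int × List String := (0, 1, ["a12b"])

def Spec_findNumberHard (x : Int) (y : Int) (inp : List String) (out : List Int) : Prop := out = findNumberHard_alt x y inp
instance (x : Int) (y : Int) (inp : List String) (out : List Int) : Decidable (Spec_findNumberHard x y inp out) := by unfold Spec_findNumberHard; infer_instance

-- ===== CLAIM (what is proved, stated in full; the proofs are below) =====
def Claim_equal_findNumberHard : Prop := ∀ (x : Int) (y : Int) (inp : List String), Dom_findNumberHard x y inp → Pre_findNumberHard x y inp → Spec_findNumberHard x y inp (findNumberHard x y inp)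

-- ===== LEMMAS AND PROOFS =====

-- pvDigitRun is the length of the leading digit run
theorem pvDigitRun_eq (l : List Char) :
    pvDigitRun l = ((l.takeWhile PySem.Chars.isdigit).length : Int) := by
  induction l with
  | nil => simp [pvDigitRun]
  | cons c rest ih =>
    by_cases h : PySem.Chars.isdigit c
    · simp [pvDigitRun, h, ih]
    · simp [pvDigitRun, h]

theorem scanLeft_eq (cs : List Char) (j : Nat) (hj : j < cs.length) :
    pvScanLeft cs (j + 1) (j : Int) =
      ((j : Int) + 1) - (((cs.take (j + 1)).reverse.takeWhile PySem.Chars.isdigit).length : Int) := by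
  induction j with
  | zero =>
    have htake : cs.take 1 = [cs[0]] := by
      rw [List.take_add_one]; simp [List.getElem?_eq_getElem hj]
    have hget0 : PySem.List.pyGetD cs 0 ' ' = cs[0] := by
      rw [PySem.List.pyGetD_zero]; exact List.getD_eq_getElem cs ' ' hj
    rw [htake]
    by_cases hd : PySem.Chars.isdigit cs[0]
    · simp [pvScanLeft, hd, hget0]
    · simp [pvScanLeft, hd, hget0]
  | succ j ih =>
    have hj' : j + 1 < cs.length := hj
    have hget : PySem.List.pyGetD cs ((j + 1 : Nat) : Int) ' ' = cs[j + 1] := by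
      rw [PySem.List.pyGetD_natCast]; exact List.getD_eq_getElem cs ' ' hj'
    have htake : cs.take (j + 2) = cs.take (j + 1) ++ [cs[j + 1]] := by
      rw [List.take_add_one]; simp [List.getElem?_eq_getElem hj']
    have hstep : ((j + 1 : Nat) : Int) - 1 = ((j : Nat) : Int) := by push_cast; ring
    rw [htake]
    have hunf : pvScanLeft cs (j + 1 + 1) ((j + 1 : Nat) : Int) =
        (if !(PySem.Chars.isdigit (PySem.List.pyGetD cs ((j + 1 : Nat) : Int) ' ')) then ((j + 1 : Nat) : Int) + 1
         else pvScanLeft cs (j + 1) (((j + 1 : Nat) : Int) - 1)) := rfl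
    by_cases hd : PySem.Chars.isdigit cs[j + 1]
    · have ihh := ih (by omega)
      rw [hunf, hget, if_neg (by simp [hd]), hstep, ihh]
      simp only [List.reverse_append, List.reverse_singleton, List.singleton_append,
        List.takeWhile_cons, hd, if_true, List.length_cons]
      push_cast; omega
    · rw [hunf, hget, if_pos (by simp [hd])]
      simp only [List.reverse_append, List.reverse_singleton, List.singleton_append,
        List.takeWhile_cons, hd, Bool.false_eq_true, if_false, List.length_nil]
      push_cast; omega

theorem scanRight_eq (cs : List Char) (m a : Nat) (hm : a + m = cs.length) :
    pvScanRight cs ((cs.length : Int) - 1) (PySem.List.pyRange (a : Int) (cs.length : Int) 1) =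
      (a : Int) + (((cs.drop a).takeWhile PySem.Chars.isdigit).length : Int) - 1 := by
  induction m generalizing a with
  | zero =>
    rw [PySem.List.pyRange_one_eq_nil (by omega)]
    have hnil : cs.drop a = [] := List.drop_eq_nil_of_le (by omega)
    simp only [pvScanRight, hnil, List.takeWhile_nil, List.length_nil, Nat.cast_zero]
    omega
  | succ m ih =>
    have ha : a < cs.length := by omega
    rw [PySem.List.pyRange_one_cons (by omega)]
    have hget : PySem.List.pyGetD cs (a : Int) ' ' = cs[a] := by
      rw [PySem.List.pyGetD_natCast]; exact List.getD_eq_getElem cs ' ' ha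
    have hdrop : cs.drop a = cs[a] :: cs.drop (a + 1) := List.drop_eq_getElem_cons ha
    by_cases hd : PySem.Chars.isdigit cs[a]
    · simp only [pvScanRight, hget]
      rw [if_neg (by simp [hd]), show ((a : Int) + 1) = ((a + 1 : Nat) : Int) by push_cast; ring,
        ih (a + 1) (by omega), hdrop]
      simp only [List.takeWhile_cons, hd, if_true, List.length_cons]
      push_cast; omega
    · simp only [pvScanRight, hget]
      rw [if_pos (by simp [hd]), hdrop]
      simp only [List.takeWhile_cons, hd, Bool.false_eq_true, if_false, List.length_nil]
      push_cast; omega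

theorem foldl_chars (cs : List Char) (kk : Nat) :
    ∀ (a : Nat) (acc0 : List Char), a + kk ≤ cs.length →
    (PySem.List.pyRange (a : Int) ((a : Int) + (kk : Int)) 1).foldl
        (fun acc i => acc ++ [PySem.List.pyGetD cs i ' ']) acc0 =
      acc0 ++ (cs.drop a).take kk := by
  induction kk with
  | zero =>
    intro a acc0 h
    rw [show ((a : Int) + ((0 : Nat) : Int)) = (a : Int) by push_cast; ring,
      PySem.List.pyRange_one_eq_nil le_rfl]
    simp
  | succ kk ih =>
    intro a acc0 h
    have ha : a < cs.length := by omega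
    rw [PySem.List.pyRange_one_cons (by push_cast; omega)]
    have hget : PySem.List.pyGetD cs (a : Int) ' ' = cs[a] := by
      rw [PySem.List.pyGetD_natCast]; exact List.getD_eq_getElem cs ' ' ha
    simp only [List.foldl_cons, hget]
    rw [show ((a : Int) + 1) = ((a + 1 : Nat) : Int) by push_cast; ring,
      show ((a : Int) + ((kk + 1 : Nat) : Int)) = (((a + 1 : Nat) : Int) + ((kk : Nat) : Int)) by push_cast; ring,
      ih (a + 1) (acc0 ++ [cs[a]]) (by omega)]
    rw [List.drop_eq_getElem_cons ha, List.take_succ_cons]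
    simp

-- common tail: from the same start index, A's scan+rebuild equals B's slice of the digit run
theorem tail_eq (x : Int) (inp : List String) (sN : Nat)
    (hs : sN ≤ (PySem.List.pyGetD inp x "").toList.length) :
    pvFindNumber x (sN : Int)
        (pvScanRight (PySem.List.pyGetD inp x "").toList
          ((((PySem.List.pyGetD inp x "").toList.length : Int)) - 1)
          (PySem.List.pyRange (sN : Int) (((PySem.List.pyGetD inp x "").toList.length : Int)) 1)) inp
      = (PySem.Int.ofChars? (PySem.List.slice (PySem.List.pyGetD inp x "").toList (some (sN : Int))
          (some ((sN : Int) + pvDigitRun (PySem.List.slice (PySem.List.pyGetD inp x "").toList (some (sN : Int)) none))))).getD 0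
    ∧ pvScanRight (PySem.List.pyGetD inp x "").toList
          ((((PySem.List.pyGetD inp x "").toList.length : Int)) - 1)
          (PySem.List.pyRange (sN : Int) (((PySem.List.pyGetD inp x "").toList.length : Int)) 1)
      = (sN : Int) + (((PySem.List.slice (PySem.List.pyGetD inp x "").toList (some (sN : Int))
          (some ((sN : Int) + pvDigitRun (PySem.List.slice (PySem.List.pyGetD inp x "").toList (some (sN : Int)) none)))).length : Int)) - 1 := by
  set cs := (PySem.List.pyGetD inp x "").toList with hcs
  have hk : ((cs.drop sN).takeWhile PySem.Chars.isdigit).length ≤ cs.length - sN := by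
    have h1 := (List.takeWhile_sublist (l := cs.drop sN) PySem.Chars.isdigit).length_le
    simpa [List.length_drop] using h1
  set k := ((cs.drop sN).takeWhile PySem.Chars.isdigit).length with hkdef
  have he := scanRight_eq cs (cs.length - sN) sN (by omega)
  rw [← hkdef] at he
  have hslice_from : PySem.List.slice cs (some (sN : Int)) none = cs.drop sN := by
    rw [PySem.List.slice_from_natCast]
  have hrun : PySem.List.slice cs (some (sN : Int))
      (some ((sN : Int) + pvDigitRun (PySem.List.slice cs (some (sN : Int)) none))) = (cs.drop sN).take k := by
    rw [hslice_from, pvDigitRun_eq, ← hkdef, PySem.List.slice_natCast_add]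
  have hlen : ((cs.drop sN).take k).length = k := by
    simp [List.length_take, List.length_drop]; omega
  constructor
  · unfold pvFindNumber
    rw [he, hrun, ← hcs,
      show ((sN : Int) + (k : Int) - 1 + 1) = ((sN : Int) + (k : Int)) by ring,
      foldl_chars cs k sN [] (by omega)]
    simp
  · rw [he, hrun, hlen]

-- ===== VERDICT (by name: the statement is the Claim_ definition above) =====
theorem findNumberHard_spec : Claim_equal_findNumberHard := by
  intro x y inp _ hpre
  obtain ⟨hx, hy, -⟩ := hpre
  unfold Spec_findNumberHard
  simp only [findNumberHard, findNumberHard_alt]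
  set cs := (PySem.List.pyGetD inp x "").toList with hcs
  have hstart : ∃ sN : Nat, sN ≤ cs.length ∧
      pvScanLeft cs (y + 1).toNat y = (sN : Int) ∧
      (((if 0 ≤ y then PySem.List.slice cs none (some (y + 1)) else []).length : Int) -
        pvDigitRun ((PySem.List.slice? (if 0 ≤ y then PySem.List.slice cs none (some (y + 1)) else []) none none (-1)).getD []) = (sN : Int)) := by
    by_cases hy0 : 0 ≤ y
    · lift y to Nat using hy0 with j
      have hjL : j < cs.length := by exact_mod_cast hy
      have hTle : ((cs.take (j + 1)).reverse.takeWhile PySem.Chars.isdigit).length ≤ j + 1 := by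
        have h1 := (List.takeWhile_sublist (l := (cs.take (j + 1)).reverse) PySem.Chars.isdigit).length_le
        simp [List.length_reverse, List.length_take] at h1
        omega
      set t := ((cs.take (j + 1)).reverse.takeWhile PySem.Chars.isdigit).length with htdef
      refine ⟨(j + 1) - t, by omega, ?_, ?_⟩
      · rw [show ((j : Int) + 1).toNat = j + 1 by omega, scanLeft_eq cs j hjL, ← htdef]; omega
      · rw [if_pos (by exact_mod_cast Nat.zero_le j),
          show ((j : Int) + 1) = ((j + 1 : Nat) : Int) by push_cast; ring,
          PySem.List.slice_to_natCast, PySem.List.slice?_none_none_neg_one]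
        simp only [Option.getD_some, pvDigitRun_eq, ← htdef, List.length_take,
          min_eq_left (by omega : j + 1 ≤ cs.length)]
        push_cast; omega
    · refine ⟨0, Nat.zero_le _, ?_, ?_⟩
      · rw [show (y + 1).toNat = 0 by omega]; rfl
      · rw [if_neg hy0, PySem.List.slice?_none_none_neg_one]
        simp [pvDigitRun]
  obtain ⟨sN, hsle, hA, hB⟩ := hstart
  rw [hA, hB]
  have ht := tail_eq x inp sN (by rw [← hcs]; exact hsle)
  rw [← hcs] at ht
  rw [ht.1, ht.2]
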